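-- pv_equiv track=rewrite | github.com/chenant2017/cp-problems | Silver/Training/holstein.py | bfs
-- ===== SOURCE A (Python) =====
-- def bfs(required, feeders):
--   queue = [None]
--   while True:
--     scoops = queue.pop(0)
--     if is_good(scoops, required, feeders):
--       return scoops
--     for c in get_children(scoops, feeders):
--       queue.append(c)
--
-- def is_good(scoops, required, feeders):
--   if scoops is None:
--     return False
--   result = [0 for i in required]
--   for i in scoops:
--     for j in range(len(feeders[i])):
--       result[j] += feeders[i][j]
--   for i in range(len(result)):
--     if result[i] < required[i]:
--       return False
--   return True
--
-- def get_children(scoops, feeders):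
--   if scoops is None:
--     return ([i] for i in range(len(feeders)))
--   else:
--     return (scoops + [i] for i in range(scoops[-1] + 1, len(feeders)))
-- ===== SOURCE B (Python) =====
-- def bfs(required, feeders):
--     n = len(feeders)
--
--     def good(combo):
--         return all(
--             required[j] <= sum(feeders[i][j] if j < len(feeders[i]) else 0 for i in combo)
--             for j in range(len(required)))
--
--     def combos(start, k):
--         if k == 0:
--             yield []
--         else:
--             for i in range(start, n):
--                 for rest in combos(i + 1, k - 1):
--                     yield [i] + rest
--
--     for k in range(1, n + 1):
--         for c in combos(0, k):
--             if good(c):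
--                 return c
--     return None  # no feasible subset: the original raises IndexError here (outside Pre_)
-- ===== Notes on version B (the rewrite author's own statement) =====
-- stated objective: simpler
-- what changed: Replaces the BFS queue with its None sentinel and get_children generator by a direct recursive enumeration of index combinations in size-then-lexicographic order, returning the first combination whose per-vitamin sums meet the requirements (and None instead of crashing when none exists).
import Mathlib
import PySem

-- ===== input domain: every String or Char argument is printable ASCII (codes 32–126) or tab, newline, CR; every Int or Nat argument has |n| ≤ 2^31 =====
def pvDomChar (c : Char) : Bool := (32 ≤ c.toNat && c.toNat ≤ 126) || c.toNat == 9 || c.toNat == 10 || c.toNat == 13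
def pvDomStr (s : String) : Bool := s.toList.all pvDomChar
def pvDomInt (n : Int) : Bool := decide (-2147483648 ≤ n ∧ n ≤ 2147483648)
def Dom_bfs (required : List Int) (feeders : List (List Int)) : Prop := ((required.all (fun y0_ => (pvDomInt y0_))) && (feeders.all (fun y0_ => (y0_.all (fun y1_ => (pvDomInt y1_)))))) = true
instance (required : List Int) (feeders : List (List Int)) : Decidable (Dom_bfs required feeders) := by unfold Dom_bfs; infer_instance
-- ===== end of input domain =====

-- B replaces A's queue-driven breadth-first search with a direct size-then-lexicographic
-- enumeration of index combinations (recursive generator, no queue, no None sentinel);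
-- same return value on every input where A returns (objective: simpler).

-- ===== PORT A =====
-- helpers of A, transliterated

-- is_good(scoops, required, feeders); `result[j] += feeders[i][j]` is ported with the total
-- pySetD/pyGetD forms, exact wherever Python does not raise (j < len(result) — Pre_ excludes
-- the runs where Python's is_good raises IndexError); feeders[i] with i a valid queue index.
def isGoodA (scoops : Option (List Int)) (required : List Int) (feeders : List (List Int)) : Bool :=
  match scoops with
  | none => false
  | some sc =>
    let result := sc.foldl (fun res i =>
      (PySem.List.pyRange 0 ((PySem.List.pyGetD feeders i []).length : Int) 1).foldl
        (fun r j => PySem.List.pySetD r j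
          (PySem.List.pyGetD r j 0 + PySem.List.pyGetD (PySem.List.pyGetD feeders i []) j 0)) res)
      (required.map (fun _ => (0 : Int)))
    (PySem.List.pyRange 0 (result.length : Int) 1).all
      (fun i => !decide (PySem.List.pyGetD result i 0 < PySem.List.pyGetD required i 0))

-- get_children(scoops, feeders); scoops[-1] via pyGetD (queue elements are never []).
def childrenA (scoops : Option (List Int)) (feeders : List (List Int)) : List (Option (List Int)) :=
  match scoops with
  | none => (PySem.List.pyRange 0 (feeders.length : Int) 1).map (fun i => some [i])
  | some sc => (PySem.List.pyRange (PySem.List.pyGetD sc (-1) 0 + 1) (feeders.length : Int) 1).map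
      (fun i => some (sc ++ [i]))

-- the while-True loop; fuel only makes it total: the BFS visits at most 2^len(feeders)
-- nodes, so under Pre_ the fuel is never exhausted.  An empty queue is Python's
-- IndexError on queue.pop(0) (excluded by Pre_).
def bfsLoop (required : List Int) (feeders : List (List Int)) : Nat → List (Option (List Int)) → List Int
  | 0, _ => []
  | _ + 1, [] => []
  | fuel + 1, s :: rest =>
    if isGoodA s required feeders then s.getD []
    else bfsLoop required feeders fuel (rest ++ childrenA s feeders)

def bfs (required : List Int) (feeders : List (List Int)) : List Int :=
  bfsLoop required feeders (2 ^ feeders.length + 1) [none]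

-- ===== PORT B =====
-- helpers of B (Source B), transliterated

def goodB (combo : List Int) (required : List Int) (feeders : List (List Int)) : Bool :=
  (PySem.List.pyRange 0 (required.length : Int) 1).all (fun j =>
    decide (PySem.List.pyGetD required j 0 ≤
      (combo.map (fun i =>
        if j < ((PySem.List.pyGetD feeders i []).length : Int)
        then PySem.List.pyGetD (PySem.List.pyGetD feeders i []) j 0 else 0)).sum))

-- combos(start, k): all increasing k-element index lists from [start, n), lexicographic.
def combosB (n : Nat) : Nat → Nat → List (List Int)
  | 0, _ => [[]]
  | k + 1, start => (List.range' start (n - start)).flatMap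
      (fun i => (combosB n k (i + 1)).map (fun rest => ((i : Nat) : Int) :: rest))

-- Source B returns None when no nonempty subset works (A raises IndexError there; outside Pre_):
-- the port returns [] in that unreachable branch.
def bfs_alt (required : List Int) (feeders : List (List Int)) : List Int :=
  match (List.range' 1 feeders.length).findSome?
      (fun k => (combosB feeders.length k 0).find? (fun c => goodB c required feeders)) with
  | some c => c
  | none => []

-- ===== PRECONDITION & SPEC =====
-- spec-side notion (used only by Pre_): the index set s covers every requirement
def goodSubset (required : List Int) (feeders : List (List Int)) (s : List Nat) : Bool :=
  (List.range required.length).all (fun j =>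
    decide (required.getD j 0 ≤ (s.map (fun i => (feeders.getD i []).getD j 0)).sum))

-- Pre_ is exactly the set of inputs on which A returns normally.  A raises IndexError
-- otherwise: either its queue empties (no nonempty subset of feeders meets the
-- requirements), or is_good indexes result[j] out of range (a tested combination contains
-- a feeder row longer than required, before any satisfying combination was reached —
-- combinations are tested singletons first, so this reduces to the second disjunct).
def Pre_bfs (required : List Int) (feeders : List (List Int)) : Prop :=
  ((∀ row ∈ feeders, row.length ≤ required.length) ∧
    ∃ s ∈ (List.range feeders.length).sublists, s ≠ [] ∧ goodSubset required feeders s = true)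
  ∨ (∃ i ∈ List.range feeders.length,
      (∀ j ∈ List.range (i + 1), (feeders.getD j []).length ≤ required.length) ∧
      goodSubset required feeders [i] = true)

instance (required : List Int) (feeders : List (List Int)) : Decidable (Pre_bfs required feeders) := by
  unfold Pre_bfs; infer_instance

def pvWitness_bfs : List Int × List (List Int) := ([1], [[1]])

def Spec_bfs (required : List Int) (feeders : List (List Int)) (out : List Int) : Prop := out = bfs_alt required feeders
instance (required : List Int) (feeders : List (List Int)) (out : List Int) : Decidable (Spec_bfs required feeders out) := by unfold Spec_bfs; infer_instance

-- ===== CLAIM (what is proved, stated in full; the proofs are below) =====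
def Claim_equal_bfs : Prop := ∀ (required : List Int) (feeders : List (List Int)), Dom_bfs required feeders → Pre_bfs required feeders → Spec_bfs required feeders (bfs required feeders)

-- ===== LEMMAS AND PROOFS =====

-- pyRange over two Nat casts is List.range', with Nat-cast elements
lemma pyRange_natCast' (a b : Nat) :
    PySem.List.pyRange (a : Int) (b : Int) 1 = (List.range' a (b - a)).map (fun m : Nat => (m : Int)) := by
  have h : ((b : Int) - (a : Int)).toNat = b - a := by omega
  rw [PySem.List.pyRange_one, h, List.range'_eq_map_range, List.map_map]
  exact List.map_congr_left (fun k _ => by simp)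

lemma pyRange_zero_natCast' (b : Nat) :
    PySem.List.pyRange 0 (b : Int) 1 = (List.range b).map (fun m : Nat => (m : Int)) := by
  have h := pyRange_natCast' 0 b
  simpa [← List.range_eq_range'] using h

lemma getD_map_zero (l : List Int) (jj : Nat) : (l.map (fun _ => (0 : Int))).getD jj 0 = 0 := by
  simp only [List.getD_eq_getElem?_getD, List.getElem?_map]
  cases l[jj]? <;> simp

-- the summand of B's good at a Nat index pair is the padded row entry
lemma ifEntry (feeders : List (List Int)) (j m : Nat) :
    (if (j : Int) < (((PySem.List.pyGetD feeders ((m : Nat) : Int) []).length : Nat) : Int)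
     then PySem.List.pyGetD (PySem.List.pyGetD feeders ((m : Nat) : Int) []) ((j : Nat) : Int) 0 else 0)
    = (feeders.getD m []).getD j 0 := by
  simp only [PySem.List.pyGetD_natCast, Nat.cast_lt]
  by_cases h : j < (feeders.getD m []).length
  · rw [if_pos h]
  · rw [if_neg h, List.getD_eq_default _ _ (by omega)]

lemma flatMap_map' {α β γ : Type} (l : List α) (f : α → β) (g : β → List γ) :
    (l.map f).flatMap g = l.flatMap (fun x => g (f x)) := by
  induction l with
  | nil => rfl
  | cons a l ih => simp [ih]

lemma flatMap_single {α β : Type} (l : List α) (f : α → β) : (l.flatMap fun x => [f x]) = l.map f := by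
  induction l with
  | nil => rfl
  | cons a l ih => simp [ih]

-- Bool-function congruence helpers (pointwise on members)
lemma find?_congr' {α} (p q : α → Bool) : ∀ (l : List α), (∀ a ∈ l, p a = q a) → l.find? p = l.find? q := by
  intro l
  induction l with
  | nil => intro _; rfl
  | cons x xs ih =>
    intro h
    simp only [List.find?_cons, h x (List.mem_cons_self)]
    cases q x
    · exact ih (fun a ha => h a (List.mem_cons_of_mem _ ha))
    · rfl

lemma all_congr' {α} (p q : α → Bool) : ∀ (l : List α), (∀ a ∈ l, p a = q a) → l.all p = l.all q := by
  intro l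
  induction l with
  | nil => intro _; rfl
  | cons x xs ih =>
    intro h
    simp only [List.all_cons, h x (List.mem_cons_self), ih (fun a ha => h a (List.mem_cons_of_mem _ ha))]

-- first index satisfying q inside range' is found
lemma find?_range'_first (q : Nat → Bool) (i0 : Nat) (hq : q i0 = true)
    (hlt : ∀ x < i0, q x = false) :
    ∀ (l a : Nat), a ≤ i0 → i0 < a + l → (List.range' a l).find? q = some i0 := by
  intro l
  induction l with
  | zero => intro a h1 h2; omega
  | succ m ih =>
    intro a h1 h2
    rw [List.range'_succ, List.find?_cons]
    by_cases hai : a = i0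
    · subst hai; simp [hq]
    · have : q a = false := hlt a (by omega)
      simp only [this]
      exact ih (a + 1) (by omega) (by omega)

-- ---- characterizing A's is_good ----

lemma getD_set' (l : List Int) (i : Nat) (v : Int) (j : Nat) :
    (l.set i v).getD j 0 = if i = j ∧ i < l.length then v else l.getD j 0 := by
  simp only [List.getD_eq_getElem?_getD, List.getElem?_set]
  split_ifs
  all_goals simp_all
  all_goals omega

-- the inner `for j in range(len(feeders[i]))` loop, written over List.range after casts
lemma innerFold_spec (row : List Int) : ∀ (L : Nat) (res : List Int), L ≤ res.length →
    ((List.range L).foldl (fun r j => r.set j (r.getD j 0 + row.getD j 0)) res).length = res.length ∧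
    ∀ jj : Nat, ((List.range L).foldl (fun r j => r.set j (r.getD j 0 + row.getD j 0)) res).getD jj 0
      = res.getD jj 0 + (if jj < L then row.getD jj 0 else 0) := by
  intro L
  induction L with
  | zero => intro res _; refine ⟨rfl, fun jj => by simp⟩
  | succ L ih =>
    intro res hL
    obtain ⟨ihlen, ihget⟩ := ih res (by omega)
    rw [List.range_succ, List.foldl_append]
    simp only [List.foldl_cons, List.foldl_nil]
    constructor
    · rw [List.length_set]; exact ihlen
    · intro jj
      rw [getD_set']
      by_cases hjj : jj = L
      · subst hjj
        rw [if_pos ⟨rfl, by rw [ihlen]; omega⟩, ihget jj, if_neg (by omega), if_pos (by omega)]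
        ring
      · rw [if_neg (by intro h; exact hjj h.1.symm), ihget jj]
        by_cases h2 : jj < L
        · rw [if_pos h2, if_pos (by omega)]
        · rw [if_neg h2, if_neg (by omega)]

-- value of is_good's accumulated result vector
lemma outerFold_spec (required : List Int) (feeders : List (List Int)) :
    ∀ (c : List Int) (res : List Int), res.length = required.length →
    (∀ x ∈ c, ∃ m : Nat, x = (m : Int) ∧ m < feeders.length ∧ (feeders.getD m []).length ≤ required.length) →
    (c.foldl (fun res i =>
      (PySem.List.pyRange 0 ((PySem.List.pyGetD feeders i []).length : Int) 1).foldl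
        (fun r j => PySem.List.pySetD r j
          (PySem.List.pyGetD r j 0 + PySem.List.pyGetD (PySem.List.pyGetD feeders i []) j 0)) res) res).length
      = required.length ∧
    ∀ jj : Nat, (c.foldl (fun res i =>
      (PySem.List.pyRange 0 ((PySem.List.pyGetD feeders i []).length : Int) 1).foldl
        (fun r j => PySem.List.pySetD r j
          (PySem.List.pyGetD r j 0 + PySem.List.pyGetD (PySem.List.pyGetD feeders i []) j 0)) res) res).getD jj 0
      = res.getD jj 0 + (c.map (fun x => (feeders.getD x.toNat []).getD jj 0)).sum := by
  intro c
  induction c with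
  | nil => intro res hres _; exact ⟨by simpa using hres, fun jj => by simp⟩
  | cons x c ih =>
    intro res hres hval
    obtain ⟨m, hxm, hmn, hshort⟩ := hval x List.mem_cons_self
    subst hxm
    simp only [List.foldl_cons]
    have hhead : (PySem.List.pyRange 0 ((PySem.List.pyGetD feeders ((m : Nat) : Int) []).length : Int) 1).foldl
        (fun r j => PySem.List.pySetD r j
          (PySem.List.pyGetD r j 0 + PySem.List.pyGetD (PySem.List.pyGetD feeders ((m : Nat) : Int) []) j 0)) res
        = (List.range (feeders.getD m []).length).foldl
            (fun r j => r.set j (r.getD j 0 + (feeders.getD m []).getD j 0)) res := by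
      simp only [PySem.List.pyGetD_natCast, pyRange_zero_natCast', List.foldl_map,
        PySem.List.pySetD_natCast]
    rw [hhead]
    obtain ⟨hlen1, hget1⟩ := innerFold_spec (feeders.getD m []) (feeders.getD m []).length res (by omega)
    obtain ⟨hlen2, hget2⟩ := ih _ (by rw [hlen1, hres]) (fun y hy => hval y (List.mem_cons_of_mem _ hy))
    refine ⟨hlen2, fun jj => ?_⟩
    rw [hget2, hget1 jj, List.map_cons, List.sum_cons]
    have hrow : (if jj < (feeders.getD m []).length then (feeders.getD m []).getD jj 0 else 0)
        = (feeders.getD ((m : Int)).toNat []).getD jj 0 := by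
      simp only [Int.toNat_natCast]
      by_cases h : jj < (feeders.getD m []).length
      · rw [if_pos h]
      · rw [if_neg h, List.getD_eq_default _ _ (by omega)]
    rw [hrow]
    ring

-- A's is_good agrees with B's good on any combination of in-range short-row indices
lemma bridge (required : List Int) (feeders : List (List Int)) (c : List Int)
    (hc : ∀ x ∈ c, ∃ m : Nat, x = (m : Int) ∧ m < feeders.length ∧ (feeders.getD m []).length ≤ required.length) :
    isGoodA (some c) required feeders = goodB c required feeders := by
  obtain ⟨hlen1, hget1⟩ := outerFold_spec required feeders c (required.map (fun _ => (0 : Int)))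
    (by simp) hc
  simp only [isGoodA, goodB]
  rw [hlen1, pyRange_zero_natCast', List.all_map, List.all_map]
  apply all_congr'
  intro j hj
  simp only [Function.comp_apply]
  have hsum : ((c.map (fun i =>
      if (j : Int) < ((PySem.List.pyGetD feeders i []).length : Int)
      then PySem.List.pyGetD (PySem.List.pyGetD feeders i []) (j : Int) 0 else 0))).sum
      = (c.map (fun x => (feeders.getD x.toNat []).getD j 0)).sum := by
    congr 1
    apply List.map_congr_left
    intro x hx
    obtain ⟨m, hxm, hmn, _⟩ := hc x hx
    subst hxm
    simpa using ifEntry feeders j m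
  rw [hsum]
  simp only [PySem.List.pyGetD_natCast]
  rw [hget1 j, getD_map_zero]
  rw [← decide_not, decide_eq_decide]
  omega

-- B's good on a Nat-index list is the spec-side goodSubset
lemma goodB_natList (required : List Int) (feeders : List (List Int)) (s : List Nat) :
    goodB (s.map (fun x : Nat => (x : Int))) required feeders = goodSubset required feeders s := by
  simp only [goodB, goodSubset, pyRange_zero_natCast', List.all_map, List.map_map]
  apply all_congr'
  intro j _
  simp only [Function.comp_apply, PySem.List.pyGetD_natCast, Nat.cast_lt]
  congr 2
  congr 1
  refine List.map_congr_left fun m _ => ?_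
  simp only [Function.comp_apply, PySem.List.pyGetD_natCast]
  by_cases h : j < (feeders.getD m []).length
  · rw [if_pos h]
  · rw [if_neg h, List.getD_eq_default _ _ (by omega)]

-- ---- the enumeration: BFS levels are B's combination lists ----

lemma mem_combosB_elems (n : Nat) : ∀ (k s : Nat) (c : List Int), c ∈ combosB n k s →
    ∀ x ∈ c, ∃ m : Nat, x = (m : Int) ∧ m < n := by
  intro k
  induction k with
  | zero =>
    intro s c hc x hx
    simp only [combosB, List.mem_singleton] at hc
    subst hc; simp at hx
  | succ k ih =>
    intro s c hc x hx
    simp only [combosB, List.mem_flatMap, List.mem_map] at hc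
    obtain ⟨i, hi, rest, hrest, rfl⟩ := hc
    have hib := List.mem_range'_1.mp hi
    rcases List.mem_cons.mp hx with rfl | hx'
    · exact ⟨i, rfl, by omega⟩
    · exact ih (i + 1) rest hrest x hx'

lemma children_of_prefix (feeders : List (List Int)) :
    ∀ (k : Nat) (i : Nat) (p : List Int), PySem.List.pyGetD p (-1) 0 = (i : Int) →
    ((combosB feeders.length k (i + 1)).map (fun c => p ++ c)).flatMap
        (fun c => childrenA (some c) feeders)
      = (combosB feeders.length (k + 1) (i + 1)).map (fun c => some (p ++ c)) := by
  intro k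
  induction k with
  | zero =>
    intro i p hp
    simp only [combosB, List.map_cons, List.map_nil, List.flatMap_cons, List.flatMap_nil,
      List.append_nil]
    simp only [childrenA, hp]
    rw [show ((i : Int) + 1) = ((i + 1 : Nat) : Int) by push_cast; ring]
    rw [pyRange_natCast', flatMap_single, List.map_map, List.map_map]
    exact List.map_congr_left fun m _ => rfl
  | succ k ih =>
    intro i p hp
    conv_lhs => rw [combosB]
    conv_rhs => rw [combosB]
    rw [List.map_flatMap, List.flatMap_assoc, List.map_flatMap]
    congr 1
    funext x
    rw [List.map_map]
    have hfn : ((fun c => p ++ c) ∘ fun rest => ((x : Nat) : Int) :: rest)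
        = fun c => (p ++ [((x : Nat) : Int)]) ++ c := by
      funext c
      show p ++ (((x : Nat) : Int) :: c) = (p ++ [((x : Nat) : Int)]) ++ c
      exact List.append_cons p _ c
    rw [hfn, ih x (p ++ [((x : Nat) : Int)]) (PySem.List.pyGetD_neg_one_append_singleton p _ 0),
      List.map_map]
    refine List.map_congr_left fun c _ => ?_
    simp only [Function.comp_apply]
    rw [← List.append_cons]

lemma children_none (feeders : List (List Int)) :
    childrenA none feeders = (combosB feeders.length 1 0).map (fun c => some c) := by
  simp only [childrenA, combosB, pyRange_zero_natCast', Nat.sub_zero, ← List.range_eq_range',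
    List.map_cons, List.map_nil]
  rw [flatMap_single, List.map_map, List.map_map]
  exact List.map_congr_left fun m _ => rfl

lemma flat_level (feeders : List (List Int)) (k : Nat) (hk : 1 ≤ k) :
    ((combosB feeders.length k 0).map (fun c => some c)).flatMap (fun s => childrenA s feeders)
      = (combosB feeders.length (k + 1) 0).map (fun c => some c) := by
  obtain ⟨j, rfl⟩ : ∃ j, k = j + 1 := ⟨k - 1, by omega⟩
  conv_lhs => rw [combosB]
  conv_rhs => rw [combosB]
  rw [List.map_flatMap, List.flatMap_assoc, List.map_flatMap]
  congr 1
  funext x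
  have h2 := children_of_prefix feeders j x [((x : Nat) : Int)]
    (PySem.List.pyGetD_neg_one_append_singleton [] _ 0)
  rw [flatMap_map'] at h2
  rw [List.map_map, List.map_map, flatMap_map']
  exact h2.trans (List.map_congr_left fun c _ => rfl)

-- ---- the loop ----

lemma bfsLoop_split (required : List Int) (feeders : List (List Int)) :
    ∀ (Q1 Q2 : List (Option (List Int))) (fuel : Nat), Q1.length ≤ fuel →
    bfsLoop required feeders fuel (Q1 ++ Q2) =
      match Q1.find? (fun s => isGoodA s required feeders) with
      | some s => s.getD []
      | none => bfsLoop required feeders (fuel - Q1.length) (Q2 ++ Q1.flatMap (fun s => childrenA s feeders)) := by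
  intro Q1
  induction Q1 with
  | nil => intro Q2 fuel _; simp [List.find?]
  | cons s Q1 ih =>
    intro Q2 fuel hf
    cases fuel with
    | zero => simp at hf
    | succ f =>
      have hlen : Q1.length ≤ f := by simp at hf; omega
      simp only [List.cons_append, bfsLoop]
      cases hg : isGoodA s required feeders
      · simp only [hg, Bool.false_eq_true, if_false, List.find?_cons, List.flatMap_cons]
        rw [List.append_assoc, ih (Q2 ++ childrenA s feeders) f hlen]
        cases hfind : Q1.find? (fun s => isGoodA s required feeders)
        · rw [List.append_assoc]
          simp [List.length_cons]
        · simp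
      · simp [hg]

lemma scan (required : List Int) (feeders : List (List Int))
    (hlen : ∀ row ∈ feeders, row.length ≤ required.length) :
    ∀ (m k : Nat) (fuel : Nat) (r : List Int), 1 ≤ k →
    (List.range' k m).findSome?
        (fun k' => (combosB feeders.length k' 0).find? (fun c => goodB c required feeders)) = some r →
    ((List.range' k m).map (fun k' => (combosB feeders.length k' 0).length)).sum ≤ fuel →
    bfsLoop required feeders fuel ((combosB feeders.length k 0).map (fun c => some c)) = r := by
  intro m
  induction m with
  | zero => intro k fuel r _ hfind _; simp at hfind
  | succ m ih =>
    intro k fuel r hk hfind hsum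
    rw [List.range'_succ] at hfind hsum
    simp only [List.findSome?_cons] at hfind
    simp only [List.map_cons, List.sum_cons] at hsum
    have hbr : ((combosB feeders.length k 0).map (fun c => some c)).find? (fun s => isGoodA s required feeders)
        = ((combosB feeders.length k 0).find? (fun c => goodB c required feeders)).map (fun c => some c) := by
      rw [List.find?_map]
      congr 1
      apply find?_congr'
      intro c hcmem
      apply bridge required feeders c
      intro x hx
      obtain ⟨mm, rfl, hmn⟩ := mem_combosB_elems feeders.length k 0 c hcmem x hx
      refine ⟨mm, rfl, hmn, hlen _ ?_⟩
      simp only [List.getD_eq_getElem?_getD, List.getElem?_eq_getElem hmn, Option.getD_some]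
      exact List.getElem_mem hmn
    have hsplit := bfsLoop_split required feeders
      ((combosB feeders.length k 0).map (fun c => some c)) [] fuel (by rw [List.length_map]; omega)
    rw [List.append_nil] at hsplit
    cases hfc : (combosB feeders.length k 0).find? (fun c => goodB c required feeders) with
    | some c =>
      rw [hfc] at hfind
      simp only [Option.some.injEq] at hfind
      subst hfind
      rw [hsplit, hbr, hfc]
      rfl
    | none =>
      rw [hfc] at hfind
      rw [hsplit, hbr, hfc]
      simp only [Option.map_none]
      rw [List.nil_append, List.length_map, flat_level feeders k hk]
      exact ih (k + 1) (fuel - (combosB feeders.length k 0).length) r (by omega) hfind (by omega)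

-- ---- counting (fuel is enough) ----

lemma sum_map_range_eq (f : Nat → Nat) : ∀ N, ((List.range N).map f).sum = ∑ x ∈ Finset.range N, f x := by
  intro N
  induction N with
  | zero => rfl
  | succ n ih => rw [List.range_succ, Finset.sum_range_succ, List.map_append, List.sum_append, ih]; rfl

lemma len_combosB (n : Nat) : ∀ (k s : Nat), (combosB n k s).length = (n - s).choose k := by
  intro k
  induction k with
  | zero => intro s; simp [combosB]
  | succ k ih =>
    intro s
    simp only [combosB, List.length_flatMap]
    rw [List.range'_eq_map_range, List.map_map]
    have hpt : ∀ y : Nat, ((fun x => ((combosB n k (x + 1)).map (fun rest => ((x : Nat) : Int) :: rest)).length) ∘ (fun x => s + x)) y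
        = (fun y => (n - s - 1 - y).choose k) y := by
      intro y
      simp only [Function.comp_apply, List.length_map, ih]
      congr 1
      omega
    rw [funext hpt, sum_map_range_eq]
    cases hN : n - s with
    | zero => simp
    | succ M =>
      rw [Finset.sum_range_reflect (fun y => y.choose k) (M + 1)]
      by_cases hk2 : M < k
      · have hz : ∑ y ∈ Finset.range (M + 1), y.choose k = 0 :=
          Finset.sum_eq_zero fun y hy => Nat.choose_eq_zero_of_lt (by simp at hy; omega)
        rw [hz, eq_comm]
        exact Nat.choose_eq_zero_of_lt (by omega)
      · rw [← Nat.sum_Icc_choose M k]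
        refine (Finset.sum_subset ?_ ?_).symm
        · intro y hy
          simp only [Finset.mem_Icc] at hy
          exact Finset.mem_range.mpr (by omega)
        · intro y hy1 hy2
          simp only [Finset.mem_range] at hy1
          simp only [Finset.mem_Icc] at hy2
          exact Nat.choose_eq_zero_of_lt (by omega)

lemma fuel_enough (n : Nat) :
    ((List.range' 1 n).map (fun k' => (combosB n k' 0).length)).sum ≤ 2 ^ n := by
  rw [List.range'_eq_map_range, List.map_map]
  have hpt : ∀ y : Nat, ((fun k' => (combosB n k' 0).length) ∘ (fun x => 1 + x)) y = n.choose (y + 1) := by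
    intro y
    simp only [Function.comp_apply, len_combosB, Nat.sub_zero]
    congr 1
    omega
  rw [funext hpt, sum_map_range_eq]
  have h := Nat.sum_range_choose n
  rw [Finset.sum_range_succ'] at h
  omega

-- ---- membership glue ----

lemma mem_combosB_of_sublist (n : Nat) :
    ∀ (t : List Nat), (∀ x ∈ t, x < n) → t.Pairwise (· < ·) → ∀ s : Nat, (∀ x ∈ t, s ≤ x) →
    t.map (fun x : Nat => (x : Int)) ∈ combosB n t.length s := by
  intro t
  induction t with
  | nil => intro _ _ s _; simp [combosB]
  | cons x t ih =>
    intro hbound hpair s hs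
    obtain ⟨hhead, htail⟩ := List.pairwise_cons.mp hpair
    simp only [List.length_cons, List.map_cons, combosB, List.mem_flatMap]
    refine ⟨x, List.mem_range'_1.mpr ⟨hs x List.mem_cons_self, by
      have := hbound x List.mem_cons_self; omega⟩, ?_⟩
    exact List.mem_map.mpr ⟨t.map (fun x : Nat => (x : Int)),
      ih (fun y hy => hbound y (List.mem_cons_of_mem _ hy)) htail (x + 1) (fun y hy => hhead y hy),
      rfl⟩

-- ===== VERDICT (by name: the statement is the Claim_ definition above) =====
-- case 2 of Pre_: the first good singleton is found by both programs
lemma singleton_case (required : List Int) (feeders : List (List Int))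
    (i : Nat) (hin : i < feeders.length)
    (hshort : ∀ j ∈ List.range (i + 1), (feeders.getD j []).length ≤ required.length)
    (hgood : goodSubset required feeders [i] = true) :
    bfs required feeders = bfs_alt required feeders := by
  have hex : ∃ j : Nat, goodSubset required feeders [j] = true := ⟨i, hgood⟩
  have hP0 : goodSubset required feeders [Nat.find hex] = true := Nat.find_spec hex
  have hlt : ∀ x < Nat.find hex, goodSubset required feeders [x] = false := by
    intro x hx
    have := Nat.find_min hex hx
    simpa using this
  have hle : Nat.find hex ≤ i := Nat.find_min' hex hgood
  have hi0n : Nat.find hex < feeders.length := lt_of_le_of_lt hle hin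
  have hshort0 : ∀ j ≤ Nat.find hex, (feeders.getD j []).length ≤ required.length :=
    fun j hj => hshort j (List.mem_range.mpr (by omega))
  have hbrig : ∀ x : Nat, x ≤ Nat.find hex →
      isGoodA (some [(x : Int)]) required feeders = goodSubset required feeders [x] := by
    intro x hx
    have hb := bridge required feeders [(x : Int)] (by
      intro y hy
      simp only [List.mem_singleton] at hy
      subst hy
      exact ⟨x, rfl, by omega, hshort0 x hx⟩)
    rw [hb]
    exact goodB_natList required feeders [x]
  have hgb : ∀ x : Nat, goodB [(x : Int)] required feeders = goodSubset required feeders [x] :=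
    fun x => goodB_natList required feeders [x]
  have hc1 : combosB feeders.length 1 0 = (List.range' 0 feeders.length).map (fun x : Nat => [(x : Int)]) := by
    simp only [combosB, Nat.sub_zero, List.map_cons, List.map_nil]
    rw [flatMap_single]
  have hfind1 : (combosB feeders.length 1 0).find? (fun c => goodB c required feeders)
      = some [((Nat.find hex : Nat) : Int)] := by
    rw [hc1, List.find?_map]
    rw [find?_range'_first ((fun c => goodB c required feeders) ∘ fun x : Nat => [(x : Int)])
      (Nat.find hex)
      ((hgb _).trans hP0)
      (fun x hx => (hgb x).trans (hlt x hx))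
      feeders.length 0 (Nat.zero_le _) (by omega)]
    rfl
  have hA : bfs required feeders = [((Nat.find hex : Nat) : Int)] := by
    rw [bfs]
    simp only [bfsLoop, isGoodA, Bool.false_eq_true, if_false, List.nil_append, children_none]
    rw [hc1, List.map_map]
    have hsplit := bfsLoop_split required feeders
      ((List.range' 0 feeders.length).map ((fun c => some c) ∘ fun x : Nat => [(x : Int)])) []
      (2 ^ feeders.length)
      (by rw [List.length_map, List.length_range']; exact le_of_lt Nat.lt_two_pow_self)
    rw [List.append_nil] at hsplit
    rw [hsplit, List.find?_map]
    rw [find?_range'_first ((fun s => isGoodA s required feeders) ∘ ((fun c => some c) ∘ fun x : Nat => [(x : Int)]))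
      (Nat.find hex)
      ((hbrig (Nat.find hex) le_rfl).trans hP0)
      (fun x hx => (hbrig x (le_of_lt hx)).trans (hlt x hx))
      feeders.length 0 (Nat.zero_le _) (by omega)]
    rfl
  have hfs : (List.range' 1 feeders.length).findSome?
      (fun k => (combosB feeders.length k 0).find? (fun c => goodB c required feeders))
      = some [((Nat.find hex : Nat) : Int)] := by
    obtain ⟨m, hm⟩ : ∃ m, feeders.length = m + 1 := ⟨feeders.length - 1, by omega⟩
    have hr : List.range' 1 feeders.length = 1 :: List.range' 2 m := by
      rw [hm, List.range'_succ]
    rw [hr, List.findSome?_cons, hfind1]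
  rw [hA, bfs_alt, hfs]

theorem bfs_spec : Claim_equal_bfs := by
  unfold Claim_equal_bfs
  intro required feeders _ hpre
  unfold Spec_bfs
  rcases hpre with ⟨hlen, s, hs, hne, hgood⟩ | ⟨i, hi, hshort, hgood⟩
  · -- all rows short and some nonempty subset works: full level-by-level argument
    have hsub : List.Sublist s (List.range feeders.length) := List.mem_sublists.mp hs
    have hbound : ∀ x ∈ s, x < feeders.length := fun x hx => List.mem_range.mp (hsub.subset hx)
    have hpair : s.Pairwise (· < ·) := List.Pairwise.sublist hsub List.pairwise_lt_range
    have hmem := mem_combosB_of_sublist feeders.length s hbound hpair 0 (fun _ _ => Nat.zero_le _)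
    have hgoodB : goodB (s.map (fun x : Nat => (x : Int))) required feeders = true := by
      rw [goodB_natList]; exact hgood
    have hklen : 1 ≤ s.length := List.length_pos_iff.mpr hne
    have hkn : s.length ≤ feeders.length := by simpa using hsub.length_le
    cases hfs : (List.range' 1 feeders.length).findSome?
        (fun k => (combosB feeders.length k 0).find? (fun c => goodB c required feeders)) with
    | none =>
      exfalso
      have hnone := List.findSome?_eq_none_iff.mp hfs s.length
        (List.mem_range'_1.mpr ⟨hklen, by omega⟩)
      have := List.find?_eq_none.mp hnone _ hmem
      simp [hgoodB] at this
    | some r =>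
      have hstep : bfs required feeders
          = bfsLoop required feeders (2 ^ feeders.length)
              ((combosB feeders.length 1 0).map (fun c => some c)) := by
        rw [bfs]
        simp only [bfsLoop, isGoodA, Bool.false_eq_true, if_false, List.nil_append, children_none]
      rw [hstep, scan required feeders hlen feeders.length 1 (2 ^ feeders.length) r le_rfl hfs
        (fuel_enough feeders.length)]
      rw [bfs_alt, hfs]
  · -- a good singleton before any long row
    exact singleton_case required feeders i (List.mem_range.mp hi) hshort hgood
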